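-- pv_equiv track=rewrite | github.com/ejina21/trainig_algo | yandex_offer/a.py | search_result
-- ===== SOURCE A (Python) =====
-- from itertools import product
--
-- def hamming(a, b):
--     answer = 0
--     for i, j in zip(a, b):
--         if i != j:
--             answer += 1
--     return answer
--
-- def get_hamm_index(a, b):
--     indexes = []
--     answer = 0
--     for i in range(len(a)):
--         if a[i] != b[i]:
--             answer += 1
--             indexes.append(i)
--     return answer, indexes
--
-- def search_result(a, b, n):
--     a = list(a)
--     b = list(b)
--     result = n
--     asnwer = a.copy()
--     len_iter, indexes = get_hamm_index(a, b)
--     vars = product(range(2), repeat=len_iter)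
--     for var in vars:
--         t = a.copy()
--         for i in range(len(indexes)):
--             t[indexes[i]] = str(var[i])
--         h1 = hamming(a, t)
--         h2 = hamming(b, t)
--         tmp = max(h1, h2)
--         if tmp < result:
--             result = tmp
--             asnwer = t
--     return ''.join(asnwer)
-- ===== SOURCE B (Python) =====
-- def search_result(a, b, n):
--     diffs = [(x, y) for x, y in zip(a, b) if x != y]
--
--     def cost(x, y, c):
--         return int(x != c), int(y != c)
--
--     # suf[j] = lowest achievable (distance to a, distance to b, their sum) over diffs[j:]
--     suf = [(0, 0, 0)]
--     for x, y in reversed(diffs):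
--         (p1, p2), (q1, q2) = cost(x, y, '0'), cost(x, y, '1')
--         la, lb, ls = suf[-1]
--         suf.append((la + min(p1, q1), lb + min(p2, q2), ls + min(p1 + p2, q1 + q2)))
--     suf.reverse()
--
--     la, lb, ls = suf[0]
--     m = max(la, lb, (ls + 1) // 2)
--     if m >= n:
--         return a
--
--     u1 = u2 = m
--     bits = []
--     for (x, y), (la, lb, ls) in zip(diffs, suf[1:]):
--         d1, d2 = cost(x, y, '0')
--         if u1 - d1 >= la and u2 - d2 >= lb and (u1 - d1) + (u2 - d2) >= ls:
--             bits.append('0')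
--         else:
--             d1, d2 = cost(x, y, '1')
--             bits.append('1')
--         u1 -= d1
--         u2 -= d2
--
--     it = iter(bits)
--     return ''.join(next(it) if x != y else x for x, y in zip(a, b))
-- ===== Notes on version B (the rewrite author's own statement) =====
-- stated objective: faster
-- what changed: A brute-forces all 2^k bit assignments at the differing positions, recomputing both Hamming distances for each; B precomputes suffix lower bounds (min distance to a, to b, and to both combined) over the differing positions and builds the lexicographically-first optimal assignment in one greedy pass with an O(1) feasibility check per position, the optimum being the max of the three lower bounds; Pre_ excludes len(a) > len(b), where A raises IndexError.
import Mathlib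
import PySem

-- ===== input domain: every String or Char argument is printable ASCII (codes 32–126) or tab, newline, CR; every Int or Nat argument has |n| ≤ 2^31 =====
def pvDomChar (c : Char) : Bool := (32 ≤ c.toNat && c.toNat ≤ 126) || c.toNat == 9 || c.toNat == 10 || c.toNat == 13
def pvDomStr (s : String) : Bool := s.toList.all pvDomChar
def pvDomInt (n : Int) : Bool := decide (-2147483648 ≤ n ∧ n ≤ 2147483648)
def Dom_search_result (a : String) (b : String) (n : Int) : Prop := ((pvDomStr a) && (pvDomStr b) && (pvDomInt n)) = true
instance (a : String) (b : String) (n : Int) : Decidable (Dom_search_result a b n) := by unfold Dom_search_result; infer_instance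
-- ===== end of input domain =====

-- B replaces A's brute force over all 2^k bit assignments by suffix lower bounds plus a
-- one-pass greedy lexicographic construction (asymptotically faster); return values agree on Pre_.

-- ===== PORT A =====

-- str(v) for v ∈ range(2), as a single character (the list elements are single characters)
def pyDigit (v : Int) : Char := if v = 0 then '0' else '1'

def hamming (a : List Char) (b : List Char) : Int :=
  (a.zip b).foldl (fun answer p => if p.1 ≠ p.2 then answer + 1 else answer) 0

def get_hamm_index (a : List Char) (b : List Char) : Option (Int × List Int) :=
  (PySem.List.pyRange 0 a.length 1).foldl
    (fun st i =>
      match st with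
      | none => none
      | some (answer, indexes) =>
        match PySem.List.pyGet? a i, PySem.List.pyGet? b i with
        | some x, some y =>
          if x ≠ y then some (answer + 1, indexes ++ [i]) else some (answer, indexes)
        | _, _ => none)
    (some (0, []))

-- itertools.product(range(2), repeat=k): all k-tuples over {0,1}, leftmost component varying slowest
def product01 : Nat → List (List Int)
  | 0 => [[]]
  | k + 1 => (product01 k).map (fun t => 0 :: t) ++ (product01 k).map (fun t => 1 :: t)

def search_result (a : String) (b : String) (n : Int) : String :=
  let aL := a.toList
  let bL := b.toList
  match get_hamm_index aL bL with
  | none => ""      -- IndexError (unreachable under Pre_search_result)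
  | some (len_iter, indexes) =>
    let vars := product01 len_iter.toNat    -- len_iter = len(indexes) ≥ 0
    let st := vars.foldl
      (fun st var =>
        let t := (PySem.List.pyRange 0 indexes.length 1).foldl
          (fun t i =>
            PySem.List.pySetD t (PySem.List.pyGetD indexes i 0)
              (pyDigit (PySem.List.pyGetD var i 0))) aL
        let h1 := hamming aL t
        let h2 := hamming bL t
        let tmp := max h1 h2
        if tmp < st.1 then (tmp, t) else st)
      (n, aL)
    String.ofList st.2

-- ===== PORT B =====

-- int(x != c), int(y != c): the cost pair of writing c at a position holding (x, y)
def cost (x : Char) (y : Char) (c : Char) : Int × Int :=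
  (if x ≠ c then 1 else 0, if y ≠ c then 1 else 0)

-- body of B's suffix-bounds loop: extend suf by one triple read off suf[-1]
def sufStep (acc : List (Int × Int × Int)) (p : Char × Char) : List (Int × Int × Int) :=
  let d0 := cost p.1 p.2 '0'
  let d1 := cost p.1 p.2 '1'
  let t := PySem.List.pyGetD acc (-1) (0, 0, 0)
  acc ++ [(t.1 + min d0.1 d1.1, t.2.1 + min d0.2 d1.2, t.2.2 + min (d0.1 + d0.2) (d1.1 + d1.2))]

-- body of B's greedy loop: state (u1, u2, bits), q = ((x, y), suffix bounds after this position)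
def pickStep (st : Int × Int × List Char) (q : (Char × Char) × (Int × Int × Int)) :
    Int × Int × List Char :=
  let d0 := cost q.1.1 q.1.2 '0'
  if st.1 - d0.1 ≥ q.2.1 ∧ st.2.1 - d0.2 ≥ q.2.2.1 ∧ st.1 - d0.1 + (st.2.1 - d0.2) ≥ q.2.2.2 then
    (st.1 - d0.1, st.2.1 - d0.2, st.2.2 ++ ['0'])
  else
    let d1 := cost q.1.1 q.1.2 '1'
    (st.1 - d1.1, st.2.1 - d1.2, st.2.2 ++ ['1'])

def search_result_alt (a : String) (b : String) (n : Int) : String :=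
  let aL := a.toList
  let bL := b.toList
  let diffs := (aL.zip bL).filter (fun p => p.1 ≠ p.2)
  let suf := (diffs.reverse.foldl sufStep [(0, 0, 0)]).reverse
  let t0 := PySem.List.pyGetD suf 0 (0, 0, 0)
  let m := max (max t0.1 t0.2.1) (PySem.Int.floordiv (t0.2.2 + 1) 2)
  if m ≥ n then a
  else
    let st := (diffs.zip (PySem.List.slice suf (some 1) none)).foldl pickStep (m, m, [])
    let res := (aL.zip bL).foldl
      (fun oc p =>
        if p.1 ≠ p.2 then
          match oc.2 with
          | c :: it' => (oc.1 ++ [c], it')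
          | [] => (oc.1, ([] : List Char))   -- next(it) exhausted: unreachable, len(bits) = number of diffs
        else (oc.1 ++ [p.1], oc.2))
      (([] : List Char), st.2.2)
    String.ofList res.1

-- ===== PRECONDITION & SPEC =====

-- A reads b[i] for every i < len(a), so it raises IndexError exactly when len(b) < len(a).
def Pre_search_result (a : String) (b : String) (n : Int) : Prop :=
  a.toList.length ≤ b.toList.length

instance (a : String) (b : String) (n : Int) : Decidable (Pre_search_result a b n) := by
  unfold Pre_search_result; infer_instance

def pvWitness_search_result : String × String × Int := ("ab", "ad", 3)

def Spec_search_result (a : String) (b : String) (n : Int) (out : String) : Prop :=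
  out = search_result_alt a b n

instance (a : String) (b : String) (n : Int) (out : String) :
    Decidable (Spec_search_result a b n out) := by unfold Spec_search_result; infer_instance

-- ===== CLAIM (what is proved, stated in full; the proofs are below) =====

def Claim_equal_search_result : Prop :=
  ∀ (a : String) (b : String) (n : Int), Dom_search_result a b n →
    Pre_search_result a b n → Spec_search_result a b n (search_result a b n)

-- ===== LEMMAS AND PROOFS =====

-- ---- proof-side model of the differing positions ----

def diffsOf (P : List (Char × Char)) : List (Char × Char) := P.filter (fun p => p.1 ≠ p.2)

def isbit (c : Char) : Bool := ['0', '1'].contains c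

def typeF (p : Char × Char) : Bool := !isbit p.1 && !isbit p.2
def typeA (p : Char × Char) : Bool := isbit p.1 && !isbit p.2
def typeB (p : Char × Char) : Bool := isbit p.2 && !isbit p.1
def typeX (p : Char × Char) : Bool := isbit p.1 && isbit p.2

def feasible (f ca cb cx u1 u2 : Int) : Bool :=
  u1 ≥ f + cb && u2 ≥ f + ca && u1 + u2 ≥ 2 * f + ca + cb + cx

def cF (ds : List (Char × Char)) : Nat := ds.countP typeF
def cA (ds : List (Char × Char)) : Nat := ds.countP typeA
def cB (ds : List (Char × Char)) : Nat := ds.countP typeB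
def cX (ds : List (Char × Char)) : Nat := ds.countP typeX

def c1 (ds : List (Char × Char)) (cs : List Char) : Nat :=
  (ds.zip cs).countP (fun q => q.2 ≠ q.1.1)
def c2 (ds : List (Char × Char)) (cs : List Char) : Nat :=
  (ds.zip cs).countP (fun q => q.2 ≠ q.1.2)

def valOf (ds : List (Char × Char)) (cs : List Char) : Int := max (c1 ds cs) (c2 ds cs)

def tupC : Nat → List (List Char)
  | 0 => [[]]
  | k + 1 => (tupC k).map (fun t => '0' :: t) ++ (tupC k).map (fun t => '1' :: t)

def closed (ds : List (Char × Char)) (u1 u2 : Int) : Prop :=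
  (cF ds + cB ds : Int) ≤ u1 ∧ (cF ds + cA ds : Int) ≤ u2 ∧
  (2 * cF ds + cA ds + cB ds + cX ds : Int) ≤ u1 + u2

def greedyR : List (Char × Char) → Int → Int → List Char
  | [], _, _ => []
  | p :: tl, u1, u2 =>
    let d1 : Int := if p.1 ≠ '0' then 1 else 0
    let d2 : Int := if p.2 ≠ '0' then 1 else 0
    if feasible (cF tl) (cA tl) (cB tl) (cX tl) (u1 - d1) (u2 - d2) then
      '0' :: greedyR tl (u1 - d1) (u2 - d2)
    else
      '1' :: greedyR tl (u1 - (if p.1 ≠ '1' then 1 else 0)) (u2 - (if p.2 ≠ '1' then 1 else 0))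

def dIdxAbs : List (Char × Char) → Int → List Int
  | [], _ => []
  | p :: tl, s => if p.1 ≠ p.2 then s :: dIdxAbs tl (s + 1) else dIdxAbs tl (s + 1)

def patchP : List (Char × Char) → List Char → List Char
  | [], _ => []
  | p :: tl, cs =>
    if p.1 = p.2 then p.1 :: patchP tl cs
    else match cs with
      | c :: cs' => c :: patchP tl cs'
      | [] => p.1 :: patchP tl []

def minf {σ : Type} (val : σ → Int) (l : List σ) (r : Int) : Int :=
  l.foldl (fun acc v => min acc (val v)) r

def mB (ds : List (Char × Char)) : Int :=
  max (max ((cF ds : Int) + cA ds) ((cF ds : Int) + cB ds))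
    ((cF ds : Int) + PySem.Int.floordiv ((cA ds : Int) + cB ds + cX ds + 1) 2)

def sufT : List (Char × Char) → Int × Int × Int
  | [] => (0, 0, 0)
  | p :: tl =>
    let d0 := cost p.1 p.2 '0'
    let d1 := cost p.1 p.2 '1'
    let t := sufT tl
    (t.1 + min d0.1 d1.1, t.2.1 + min d0.2 d1.2, t.2.2 + min (d0.1 + d0.2) (d1.1 + d1.2))

def sufSuffixes : List (Char × Char) → List (Int × Int × Int)
  | [] => [(0, 0, 0)]
  | p :: tl => sufT (p :: tl) :: sufSuffixes tl

-- ---- generic list lemmas ----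

theorem find?_congr {α : Type} (p q : α → Bool) (l : List α) (h : ∀ x, p x = q x) :
    l.find? p = l.find? q := by
  have : p = q := funext h
  rw [this]

theorem foldl_enumerate_snd {α β : Type} (L : List α) (s : Int) (g : β → α → β) (init : β) :
    (PySem.List.enumerate L s).foldl (fun st q => g st q.2) init = L.foldl g init := by
  have h := PySem.List.map_snd_enumerate L s
  calc (PySem.List.enumerate L s).foldl (fun st q => g st q.2) init
      = ((PySem.List.enumerate L s).map (fun q => q.2)).foldl g init := by
        rw [List.foldl_map]
    _ = L.foldl g init := by rw [h]

theorem foldl_pyRange_zip {α β γ : Type} (xs : List α) (ys : List β) (da : α) (db : β)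
    (f : γ → Int → α → β → γ) (init : γ) (h : xs.length ≤ ys.length) :
    (PySem.List.pyRange 0 xs.length 1).foldl
      (fun st i => f st i (PySem.List.pyGetD xs i da) (PySem.List.pyGetD ys i db)) init
    = (PySem.List.enumerate (xs.zip ys) 0).foldl (fun st q => f st q.1 q.2.1 q.2.2) init := by
  have hlen : (xs.zip ys).length = xs.length := by simp [List.length_zip]; omega
  have hr : PySem.List.pyRange 0 xs.length 1
      = (PySem.List.enumerate (xs.zip ys) 0).map (fun q => q.1) := by
    rw [PySem.List.map_fst_enumerate, hlen]; norm_num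
  rw [hr, List.foldl_map]
  apply PySem.List.foldl_congr_mem
  intro acc q hq
  rw [PySem.List.mem_enumerate_iff] at hq
  obtain ⟨k, hk, rfl⟩ := hq
  have hkx : k < xs.length := by omega
  have hky : k < ys.length := by omega
  simp only [List.getElem_zip, zero_add]
  rw [PySem.List.pyGetD_natCast, PySem.List.pyGetD_natCast]
  simp [List.getD_eq_getElem?_getD, List.getElem?_eq_getElem hkx, List.getElem?_eq_getElem hky]

theorem pyGet?_some {α : Type} (xs : List α) (i : Int) (d : α) (h0 : 0 ≤ i)
    (h1 : i < (xs.length : Int)) :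
    PySem.List.pyGet? xs i = some (PySem.List.pyGetD xs i d) := by
  have hn : i.toNat < xs.length := by omega
  simp [PySem.List.pyGet?, PySem.List.pyGetD, PySem.List.pyIdx?, h0, h1]

-- ---- minf / foldmin ----

theorem minf_le_init {σ : Type} (val : σ → Int) (l : List σ) (r : Int) : minf val l r ≤ r := by
  induction l generalizing r with
  | nil => simp [minf]
  | cons v l ih =>
    simp only [minf, List.foldl_cons]
    exact le_trans (ih (min r (val v))) (min_le_left _ _)

theorem minf_le_of_mem {σ : Type} (val : σ → Int) (l : List σ) (r : Int) {v : σ} (hv : v ∈ l) :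
    minf val l r ≤ val v := by
  induction l generalizing r with
  | nil => simp at hv
  | cons w l ih =>
    simp only [minf, List.foldl_cons]
    rcases List.mem_cons.mp hv with rfl | hv'
    · exact le_trans (minf_le_init val l _) (min_le_right _ _)
    · exact ih _ hv'

theorem le_minf {σ : Type} (val : σ → Int) (l : List σ) (r : Int) (b : Int) (hr : b ≤ r)
    (hl : ∀ v ∈ l, b ≤ val v) : b ≤ minf val l r := by
  induction l generalizing r with
  | nil => simpa [minf]
  | cons w l ih =>
    simp only [minf, List.foldl_cons]
    apply ih
    · exact le_min hr (hl w List.mem_cons_self)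
    · exact fun v h => hl v (List.mem_cons_of_mem _ h)

theorem minf_achieved {σ : Type} (val : σ → Int) (l : List σ) (r : Int) :
    minf val l r = r ∨ ∃ x ∈ l, val x = minf val l r := by
  induction l generalizing r with
  | nil => left; rfl
  | cons w l ih =>
    have hm : minf val (w :: l) r = minf val l (min r (val w)) := rfl
    rcases ih (min r (val w)) with he | ⟨x, hx, hvx⟩
    · rcases min_cases r (val w) with ⟨h1, _⟩ | ⟨h1, _⟩
      · left; rw [hm, he, h1]
      · right; exact ⟨w, List.mem_cons_self, by rw [hm, he, h1]⟩
    · right; exact ⟨x, List.mem_cons_of_mem _ hx, by rw [hm, ← hvx]⟩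

theorem decand {A B C D : Prop} [Decidable A] [Decidable B] [Decidable C] [Decidable D]
    (h : (A ∧ B) ↔ (C ∧ D)) : (decide A && decide B) = (decide C && decide D) := by
  by_cases hA : A <;> by_cases hB : B <;> by_cases hC : C <;> by_cases hD : D <;> simp_all

theorem foldmin {σ : Type} (val : σ → Int) (T : σ → List Char) (l : List σ) (r : Int)
    (s : List Char) :
    l.foldl (fun st v => if val v < st.1 then (val v, T v) else st) (r, s)
    = match l.find? (fun v => decide (val v ≤ minf val l r) && decide (val v < r)) with
      | some v => (val v, T v)
      | none => (r, s) := by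
  induction l generalizing r s with
  | nil => simp
  | cons v l ih =>
    simp only [List.foldl_cons]
    have hm : minf val (v :: l) r = minf val l (min r (val v)) := rfl
    by_cases hv : val v < r
    · simp only [if_pos hv]
      have hmin : min r (val v) = val v := min_eq_right (le_of_lt hv)
      by_cases hhead : val v ≤ minf val (v :: l) r
      · have hme : minf val (v :: l) r = val v := by
          have := minf_le_init val l (min r (val v))
          rw [hm]; rw [hm] at hhead; omega
        have hcond : (decide (val v ≤ minf val (v :: l) r) && decide (val v < r)) = true := by
          simp [hhead, hv]
        rw [List.find?_cons_of_pos (p := fun x => decide (val x ≤ minf val (v :: l) r) && decide (val x < r)) hcond]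
        have hnone : l.find? (fun x => decide (val x ≤ minf val l (val v)) && decide (val x < val v)) = none := by
          rw [List.find?_eq_none]
          intro x hx
          have h1 : minf val l (val v) ≤ val x := minf_le_of_mem val l _ hx
          have h2 : minf val l (val v) = val v := by rw [hm, hmin] at hme; exact hme
          simp only [Bool.and_eq_true, decide_eq_true_eq]
          omega
        rw [ih, hnone]
      · have hcond : (decide (val v ≤ minf val (v :: l) r) && decide (val v < r)) = false := by
          simp [hhead]
        rw [List.find?_cons_of_neg (p := fun x => decide (val x ≤ minf val (v :: l) r) && decide (val x < r)) (by simp only []; rw [hcond]; simp), ih]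
        have hpe : ∀ x, (decide (val x ≤ minf val l (val v)) && decide (val x < val v))
            = (decide (val x ≤ minf val (v :: l) r) && decide (val x < r)) := by
          intro x
          apply decand
          have he : minf val (v :: l) r = minf val l (val v) := by rw [hm, hmin]
          rw [he]
          have hub : minf val l (val v) ≤ val v := minf_le_init val l _
          constructor
          · rintro ⟨h1, _⟩; exact ⟨h1, by omega⟩
          · rintro ⟨h1, _⟩
            have hlt : minf val l (val v) < val v := by
              rw [hm, hmin] at hhead; omega
            exact ⟨h1, by omega⟩
        rw [find?_congr _ _ l hpe]
        have hlt : minf val l (val v) < val v := by rw [hm, hmin] at hhead; omega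
        have he2 : minf val (v :: l) r = minf val l (val v) := by rw [hm, hmin]
        rcases minf_achieved val l (val v) with he | ⟨x, hx, hvx⟩
        · omega
        · rcases hfind : List.find? (fun x => decide (val x ≤ minf val (v :: l) r) && decide (val x < r)) l with _ | x2
          · exfalso
            have := List.find?_eq_none.mp hfind x hx
            simp only [Bool.and_eq_true, decide_eq_true_eq, he2] at this
            omega
          · rfl
    · simp only [if_neg hv]
      have hmin : min r (val v) = r := min_eq_left (by omega)
      have hcond : (decide (val v ≤ minf val (v :: l) r) && decide (val v < r)) = false := by
        simp [hv]
      rw [List.find?_cons_of_neg (p := fun x => decide (val x ≤ minf val (v :: l) r) && decide (val x < r)) (by simp only []; rw [hcond]; simp), ih, hm, hmin]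

-- ---- dIdxAbs / get_hamm_index ----

theorem dIdxAbs_shift (P : List (Char × Char)) (s : Int) :
    dIdxAbs P (s + 1) = (dIdxAbs P s).map (· + 1) := by
  induction P generalizing s with
  | nil => rfl
  | cons p tl ih =>
    by_cases hp : p.1 ≠ p.2 <;> simp [dIdxAbs, hp, ih (s + 1)]

theorem dIdxAbs_length (P : List (Char × Char)) (s : Int) :
    (dIdxAbs P s).length = (diffsOf P).length := by
  induction P generalizing s with
  | nil => rfl
  | cons p tl ih =>
    by_cases hp : p.1 ≠ p.2 <;> simp [dIdxAbs, diffsOf, List.filter_cons, hp, ih (s + 1)]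

theorem dIdxAbs_nonneg (P : List (Char × Char)) (s : Int) (hs : 0 ≤ s) :
    ∀ i ∈ dIdxAbs P s, 0 ≤ i := by
  induction P generalizing s with
  | nil => simp [dIdxAbs]
  | cons p tl ih =>
    intro i hi
    by_cases hp : p.1 ≠ p.2 <;> simp [dIdxAbs, hp] at hi
    · rcases hi with rfl | hi
      · omega
      · exact ih (s + 1) (by omega) i hi
    · exact ih (s + 1) (by omega) i hi

theorem ghi_enum (L : List (Char × Char)) (s : Int) (ans : Int) (acc : List Int) :
    (PySem.List.enumerate L s).foldl
      (fun st q =>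
        match st with
        | none => none
        | some (a, idxs) =>
          if q.2.1 ≠ q.2.2 then some (a + 1, idxs ++ [q.1]) else some (a, idxs))
      (some (ans, acc))
    = some (ans + ((diffsOf L).length : Int), acc ++ dIdxAbs L s) := by
  induction L generalizing s ans acc with
  | nil => simp [PySem.List.enumerate, diffsOf, dIdxAbs]
  | cons p tl ih =>
    rw [PySem.List.enumerate_cons]
    simp only [List.foldl_cons]
    by_cases hp : p.1 ≠ p.2
    · simp only [if_pos hp]
      rw [ih (s + 1) (ans + 1) (acc ++ [s])]
      simp [diffsOf, dIdxAbs, List.filter_cons, hp]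
      omega
    · simp only [if_neg hp]
      rw [ih (s + 1) ans acc]
      simp [diffsOf, dIdxAbs, List.filter_cons, hp]

theorem ghi_eq (al bl : List Char) (h : al.length ≤ bl.length) :
    get_hamm_index al bl
    = some (((diffsOf (al.zip bl)).length : Int), dIdxAbs (al.zip bl) 0) := by
  unfold get_hamm_index
  have hstep : (PySem.List.pyRange 0 al.length 1).foldl
      (fun st i =>
        match st with
        | none => none
        | some (answer, indexes) =>
          match PySem.List.pyGet? al i, PySem.List.pyGet? bl i with
          | some x, some y =>
            if x ≠ y then some (answer + 1, indexes ++ [i]) else some (answer, indexes)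
          | _, _ => none)
      (some ((0 : Int), ([] : List Int)))
      = (PySem.List.pyRange 0 al.length 1).foldl
      (fun st i =>
        match st with
        | none => none
        | some (answer, indexes) =>
          if PySem.List.pyGetD al i ' ' ≠ PySem.List.pyGetD bl i ' ' then
            some (answer + 1, indexes ++ [i])
          else some (answer, indexes))
      (some ((0 : Int), ([] : List Int))) := by
    apply PySem.List.foldl_congr_mem
    intro acc i hi
    rw [PySem.List.mem_pyRange_one] at hi
    rw [pyGet?_some al i ' ' hi.1 hi.2, pyGet?_some bl i ' ' hi.1 (by have h2 := hi.2; push_cast at h2 ⊢; omega)]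
  refine hstep.trans ?_
  rw [foldl_pyRange_zip al bl ' ' ' '
    (fun st i x y =>
      match st with
      | none => none
      | some (answer, indexes) =>
        if x ≠ y then some (answer + 1, indexes ++ [i]) else some (answer, indexes))
    (some ((0 : Int), ([] : List Int))) h]
  rw [ghi_enum (al.zip bl) 0 0 []]
  simp

-- ---- the patched list ----

theorem foldl_set_shift (pairs : List (Int × Char)) (z : Char) (t : List Char)
    (h : ∀ q ∈ pairs, 0 ≤ q.1) :
    pairs.foldl (fun t q => PySem.List.pySetD t (q.1 + 1) q.2) (z :: t)
    = z :: pairs.foldl (fun t q => PySem.List.pySetD t q.1 q.2) t := by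
  induction pairs generalizing t with
  | nil => rfl
  | cons q tl ih =>
    simp only [List.foldl_cons]
    have hq : 0 ≤ q.1 := h q List.mem_cons_self
    have hset : PySem.List.pySetD (z :: t) (q.1 + 1) q.2
        = z :: PySem.List.pySetD t q.1 q.2 := by
      rw [PySem.List.pySetD_of_nonneg _ _ (by omega), PySem.List.pySetD_of_nonneg _ _ hq]
      have : (q.1 + 1).toNat = q.1.toNat + 1 := by omega
      rw [this, List.set_cons_succ]
    rw [hset, ih _ (fun q hq' => h q (List.mem_cons_of_mem _ hq'))]

theorem patch_fold_eq (al bl : List Char) (cs : List Char) (h : al.length ≤ bl.length)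
    (hcs : cs.length = (diffsOf (al.zip bl)).length) :
    ((dIdxAbs (al.zip bl) 0).zip cs).foldl
      (fun t q => PySem.List.pySetD t q.1 q.2) al
    = patchP (al.zip bl) cs := by
  induction al generalizing bl cs with
  | nil => simp [dIdxAbs, patchP]
  | cons x xs ih =>
    cases bl with
    | nil => simp at h
    | cons y ys =>
      have h' : xs.length ≤ ys.length := by simpa using h
      by_cases hxy : x = y
      · have hdz : dIdxAbs ((x :: xs).zip (y :: ys)) 0
            = (dIdxAbs (xs.zip ys) 0).map (· + 1) := by
          rw [List.zip_cons_cons]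
          show dIdxAbs ((x, y) :: xs.zip ys) 0 = _
          simp only [dIdxAbs, hxy]
          rw [if_neg (by simp)]
          exact dIdxAbs_shift _ 0
        have hcs' : cs.length = (diffsOf (xs.zip ys)).length := by
          simpa [diffsOf, List.filter_cons, hxy] using hcs
        rw [hdz, List.zip_map_left, List.foldl_map]
        have hnn : ∀ q ∈ (dIdxAbs (xs.zip ys) 0).zip cs, 0 ≤ q.1 := by
          intro q hq
          exact dIdxAbs_nonneg _ 0 le_rfl q.1 (List.of_mem_zip hq).1
        have hshift := foldl_set_shift ((dIdxAbs (xs.zip ys) 0).zip cs) x xs hnn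
        simp only [Prod.map, id_eq] at *
        rw [hshift, ih ys cs h' hcs']
        simp [patchP, hxy]
      · have hne : ¬ ((x, y) : Char × Char).1 = ((x, y) : Char × Char).2 := hxy
        have hcs0 : 0 < cs.length := by
          rw [hcs]
          simp [diffsOf, List.filter_cons, List.zip_cons_cons, hxy]
        cases cs with
        | nil => simp at hcs0
        | cons c cs' =>
          have hdz : dIdxAbs ((x :: xs).zip (y :: ys)) 0
              = 0 :: (dIdxAbs (xs.zip ys) 0).map (· + 1) := by
            rw [List.zip_cons_cons]
            show dIdxAbs ((x, y) :: xs.zip ys) 0 = _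
            simp only [dIdxAbs]
            rw [if_pos (by simp [hxy])]
            rw [dIdxAbs_shift _ 0]
          have hcs' : cs'.length = (diffsOf (xs.zip ys)).length := by
            simpa [diffsOf, List.filter_cons, List.zip_cons_cons, hxy] using hcs
          rw [hdz]
          simp only [List.zip_cons_cons, List.foldl_cons]
          have hset0 : PySem.List.pySetD (x :: xs) 0 c = c :: xs := by
            rw [PySem.List.pySetD_of_nonneg _ _ le_rfl]; rfl
          rw [hset0, List.zip_map_left, List.foldl_map]
          have hnn : ∀ q ∈ (dIdxAbs (xs.zip ys) 0).zip cs', 0 ≤ q.1 := by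
            intro q hq
            exact dIdxAbs_nonneg _ 0 le_rfl q.1 (List.of_mem_zip hq).1
          have hshift := foldl_set_shift ((dIdxAbs (xs.zip ys) 0).zip cs') c xs hnn
          simp only [Prod.map, id_eq] at *
          rw [hshift, ih ys cs' h' hcs']
          simp [patchP, hxy]

theorem hamming_eq_countP (xs ys : List Char) :
    hamming xs ys = ((xs.zip ys).countP (fun p => p.1 ≠ p.2) : Nat) := by
  have := PySem.List.foldl_count_if (fun q : Char × Char => decide (q.1 ≠ q.2)) (xs.zip ys) 0
  simpa [hamming] using this

theorem diffsOf_cons (p : Char × Char) (L : List (Char × Char)) :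
    diffsOf (p :: L) = if p.1 ≠ p.2 then p :: diffsOf L else diffsOf L := by
  by_cases hp : p.1 = p.2 <;> simp [diffsOf, List.filter_cons, hp]

theorem countP_patch_left (al bl : List Char) (cs : List Char) (h : al.length ≤ bl.length)
    (hcs : cs.length = (diffsOf (al.zip bl)).length) :
    (al.zip (patchP (al.zip bl) cs)).countP (fun p => p.1 ≠ p.2)
    = c1 (diffsOf (al.zip bl)) cs := by
  induction al generalizing bl cs with
  | nil => simp [patchP, c1, diffsOf]
  | cons x xs ih =>
    cases bl with
    | nil => simp at h
    | cons y ys =>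
      have h' : xs.length ≤ ys.length := by simpa using h
      rw [List.zip_cons_cons] at *
      rw [diffsOf_cons] at *
      by_cases hxy : x = y
      · rw [if_neg (by simp [hxy])] at *
        have hp : patchP ((x, y) :: xs.zip ys) cs = x :: patchP (xs.zip ys) cs := by
          simp [patchP, hxy]
        rw [hp, List.zip_cons_cons, List.countP_cons]
        simpa using ih ys cs h' hcs
      · rw [if_pos (by simp [hxy])] at *
        have hlen : 0 < cs.length := by rw [hcs]; simp
        cases cs with
        | nil => simp at hlen
        | cons c cs' =>
          have hcs' : cs'.length = (diffsOf (xs.zip ys)).length := by simpa using hcs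
          have hp : patchP ((x, y) :: xs.zip ys) (c :: cs')
              = c :: patchP (xs.zip ys) cs' := by
            simp [patchP, hxy]
          rw [hp, List.zip_cons_cons, List.countP_cons]
          simp only [c1, List.zip_cons_cons, List.countP_cons]
          have := ih ys cs' h' hcs'
          simp only [c1] at this
          rw [this]
          by_cases hxc : x = c <;> simp [hxc, eq_comm]

theorem countP_patch_right (al bl : List Char) (cs : List Char) (h : al.length ≤ bl.length)
    (hcs : cs.length = (diffsOf (al.zip bl)).length) :
    (bl.zip (patchP (al.zip bl) cs)).countP (fun p => p.1 ≠ p.2)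
    = c2 (diffsOf (al.zip bl)) cs := by
  induction al generalizing bl cs with
  | nil => simp [patchP, c2, diffsOf]
  | cons x xs ih =>
    cases bl with
    | nil => simp at h
    | cons y ys =>
      have h' : xs.length ≤ ys.length := by simpa using h
      rw [List.zip_cons_cons] at *
      rw [diffsOf_cons] at *
      by_cases hxy : x = y
      · rw [if_neg (by simp [hxy])] at *
        have hp : patchP ((x, y) :: xs.zip ys) cs = x :: patchP (xs.zip ys) cs := by
          simp [patchP, hxy]
        rw [hp, List.zip_cons_cons, List.countP_cons]
        simpa [hxy] using ih ys cs h' hcs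
      · rw [if_pos (by simp [hxy])] at *
        have hlen : 0 < cs.length := by rw [hcs]; simp
        cases cs with
        | nil => simp at hlen
        | cons c cs' =>
          have hcs' : cs'.length = (diffsOf (xs.zip ys)).length := by simpa using hcs
          have hp : patchP ((x, y) :: xs.zip ys) (c :: cs')
              = c :: patchP (xs.zip ys) cs' := by
            simp [patchP, hxy]
          rw [hp, List.zip_cons_cons, List.countP_cons]
          simp only [c2, List.zip_cons_cons, List.countP_cons]
          have := ih ys cs' h' hcs'
          simp only [c2] at this
          rw [this]
          by_cases hyc : y = c <;> simp [hyc, eq_comm]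

theorem hamming_patch_left (al bl : List Char) (cs : List Char) (h : al.length ≤ bl.length)
    (hcs : cs.length = (diffsOf (al.zip bl)).length) :
    hamming al (patchP (al.zip bl) cs) = (c1 (diffsOf (al.zip bl)) cs : Nat) := by
  rw [hamming_eq_countP, countP_patch_left al bl cs h hcs]

theorem hamming_patch_right (al bl : List Char) (cs : List Char) (h : al.length ≤ bl.length)
    (hcs : cs.length = (diffsOf (al.zip bl)).length) :
    hamming bl (patchP (al.zip bl) cs) = (c2 (diffsOf (al.zip bl)) cs : Nat) := by
  rw [hamming_eq_countP, countP_patch_right al bl cs h hcs]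

-- ---- tuples ----

theorem tupC_eq_map (k : Nat) : tupC k = (product01 k).map (List.map pyDigit) := by
  induction k with
  | zero => rfl
  | succ k ih =>
    simp only [tupC, product01, List.map_append, List.map_map, ih]
    rfl

theorem mem_tupC (k : Nat) (cs : List Char) :
    cs ∈ tupC k ↔ cs.length = k ∧ ∀ c ∈ cs, c = '0' ∨ c = '1' := by
  induction k generalizing cs with
  | zero =>
    simp only [tupC, List.mem_singleton]
    constructor
    · rintro rfl; simp
    · rintro ⟨hl, _⟩; exact List.length_eq_zero_iff.mp hl
  | succ k ih =>
    simp only [tupC, List.mem_append, List.mem_map]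
    constructor
    · rintro (⟨t, ht, rfl⟩ | ⟨t, ht, rfl⟩) <;>
        · obtain ⟨hl, hb⟩ := (ih t).mp ht
          refine ⟨by simp [hl], ?_⟩
          intro c hc
          rcases List.mem_cons.mp hc with rfl | hc'
          · simp
          · exact hb c hc'
    · rintro ⟨hl, hb⟩
      cases cs with
      | nil => simp at hl
      | cons c t =>
        have ht : t ∈ tupC k := (ih t).mpr
          ⟨by simpa using hl, fun c' hc' => hb c' (List.mem_cons_of_mem _ hc')⟩
        rcases hb c List.mem_cons_self with rfl | rfl
        · exact Or.inl ⟨t, ht, rfl⟩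
        · exact Or.inr ⟨t, ht, rfl⟩

-- ---- feasibility / optimum / greedy ----

theorem c1_cons (p : Char × Char) (ds : List (Char × Char)) (c : Char) (cs : List Char) :
    c1 (p :: ds) (c :: cs) = c1 ds cs + (if p.1 ≠ c then 1 else 0) := by
  simp only [c1, List.zip_cons_cons, List.countP_cons]
  by_cases h : c = p.1
  · simp [h, eq_comm]
  · have h' : ¬ p.1 = c := fun hh => h hh.symm
    simp [h, h']

theorem c2_cons (p : Char × Char) (ds : List (Char × Char)) (c : Char) (cs : List Char) :
    c2 (p :: ds) (c :: cs) = c2 ds cs + (if p.2 ≠ c then 1 else 0) := by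
  simp only [c2, List.zip_cons_cons, List.countP_cons]
  by_cases h : c = p.2
  · simp [h, eq_comm]
  · have h' : ¬ p.2 = c := fun hh => h hh.symm
    simp [h, h']

theorem exists_tupC_cons (k : Nat) (Q : List Char → Prop) :
    (∃ cs ∈ tupC (k + 1), Q cs) ↔ (∃ t ∈ tupC k, Q ('0' :: t)) ∨ (∃ t ∈ tupC k, Q ('1' :: t)) := by
  simp only [tupC, List.mem_append, List.mem_map]
  constructor
  · rintro ⟨cs, ⟨t, ht, rfl⟩ | ⟨t, ht, rfl⟩, hQ⟩
    exacts [Or.inl ⟨t, ht, hQ⟩, Or.inr ⟨t, ht, hQ⟩]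
  · rintro (⟨t, ht, hQ⟩ | ⟨t, ht, hQ⟩)
    exacts [⟨'0' :: t, Or.inl ⟨t, ht, rfl⟩, hQ⟩, ⟨'1' :: t, Or.inr ⟨t, ht, rfl⟩, hQ⟩]

theorem isbit_iff (c : Char) : isbit c = true ↔ c = '0' ∨ c = '1' := by
  simp [isbit]

theorem isbit_false (c : Char) (h : isbit c = false) : c ≠ '0' ∧ c ≠ '1' := by
  constructor <;> · rintro rfl; simp [isbit] at h

theorem closed_cons_iff (p : Char × Char) (ds : List (Char × Char)) (hp : p.1 ≠ p.2)
    (u1 u2 : Int) :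
    closed (p :: ds) u1 u2
    ↔ closed ds (u1 - (if p.1 ≠ '0' then 1 else 0)) (u2 - (if p.2 ≠ '0' then 1 else 0))
      ∨ closed ds (u1 - (if p.1 ≠ '1' then 1 else 0)) (u2 - (if p.2 ≠ '1' then 1 else 0)) := by
  obtain ⟨px, py⟩ := p
  simp only at hp
  simp only [closed, cF, cA, cB, cX, List.countP_cons]
  rcases hb1 : isbit px <;> rcases hb2 : isbit py
  · obtain ⟨h10, h11⟩ := isbit_false px hb1
    obtain ⟨h20, h21⟩ := isbit_false py hb2
    simp only [typeF, typeA, typeB, typeX, hb1, hb2]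
    simp [h10, h11, h20, h21]
    push_cast
    omega
  · obtain ⟨h10, h11⟩ := isbit_false px hb1
    rcases (isbit_iff py).mp hb2 with rfl | rfl <;>
      · simp only [typeF, typeA, typeB, typeX, hb1, hb2]
        simp [h10, h11]
        push_cast
        omega
  · obtain ⟨h20, h21⟩ := isbit_false py hb2
    rcases (isbit_iff px).mp hb1 with rfl | rfl <;>
      · simp only [typeF, typeA, typeB, typeX, hb1, hb2]
        simp [h20, h21]
        push_cast
        omega
  · rcases (isbit_iff px).mp hb1 with rfl | rfl <;>
      rcases (isbit_iff py).mp hb2 with rfl | rfl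
    · simp at hp
    · simp only [typeF, typeA, typeB, typeX, hb1, hb2]
      simp
      push_cast
      omega
    · simp only [typeF, typeA, typeB, typeX, hb1, hb2]
      simp
      push_cast
      omega
    · simp at hp

theorem feas_iff_closed (ds : List (Char × Char)) (hd : ∀ p ∈ ds, p.1 ≠ p.2) (u1 u2 : Int) :
    (∃ cs ∈ tupC ds.length, (c1 ds cs : Int) ≤ u1 ∧ (c2 ds cs : Int) ≤ u2)
    ↔ closed ds u1 u2 := by
  induction ds generalizing u1 u2 with
  | nil =>
    simp only [List.length_nil, tupC, List.mem_singleton, closed, cF, cA, cB, cX,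
      List.countP_nil, c1, c2]
    constructor
    · rintro ⟨cs, rfl, h1, h2⟩
      simp only [List.zip_nil_left, List.countP_nil] at h1 h2
      push_cast at h1 h2
      refine ⟨by omega, by omega, by omega⟩
    · rintro ⟨h1, h2, _⟩
      exact ⟨[], rfl, by simp [List.countP_nil]; omega, by simp [List.countP_nil]; omega⟩
  | cons p ds ih =>
    have hp := hd p List.mem_cons_self
    have hd' : ∀ q ∈ ds, q.1 ≠ q.2 := fun q hq => hd q (List.mem_cons_of_mem _ hq)
    rw [show (p :: ds).length = ds.length + 1 from rfl, exists_tupC_cons]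
    have e0 : (∃ t ∈ tupC ds.length,
          (c1 (p :: ds) ('0' :: t) : Int) ≤ u1 ∧ (c2 (p :: ds) ('0' :: t) : Int) ≤ u2)
        ↔ closed ds (u1 - (if p.1 ≠ '0' then 1 else 0)) (u2 - (if p.2 ≠ '0' then 1 else 0)) := by
      rw [← ih hd']
      apply exists_congr; intro t
      apply and_congr_right; intro _
      rw [c1_cons, c2_cons]
      by_cases h1 : p.1 = '0' <;> by_cases h2 : p.2 = '0' <;>
        simp [h1, h2] <;> push_cast <;> omega
    have e1 : (∃ t ∈ tupC ds.length,
          (c1 (p :: ds) ('1' :: t) : Int) ≤ u1 ∧ (c2 (p :: ds) ('1' :: t) : Int) ≤ u2)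
        ↔ closed ds (u1 - (if p.1 ≠ '1' then 1 else 0)) (u2 - (if p.2 ≠ '1' then 1 else 0)) := by
      rw [← ih hd']
      apply exists_congr; intro t
      apply and_congr_right; intro _
      rw [c1_cons, c2_cons]
      by_cases h1 : p.1 = '1' <;> by_cases h2 : p.2 = '1' <;>
        simp [h1, h2] <;> push_cast <;> omega
    rw [e0, e1, closed_cons_iff p ds hp u1 u2]

theorem floordiv2_bounds (t : Int) :
    2 * PySem.Int.floordiv t 2 ≤ t ∧ t < 2 * PySem.Int.floordiv t 2 + 2 := by
  have h := (PySem.Int.floordiv_eq_iff_of_pos (a := t) (b := 2)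
    (q := PySem.Int.floordiv t 2) (by norm_num)).mp rfl
  omega

theorem closed_mB (ds : List (Char × Char)) (hd : ∀ p ∈ ds, p.1 ≠ p.2) :
    closed ds (mB ds) (mB ds) := by
  have hq := floordiv2_bounds ((cA ds : Int) + cB ds + cX ds + 1)
  have h1 : (cF ds : Int) + cA ds ≤ mB ds := le_trans (le_max_left _ _) (le_max_left _ _)
  have h2 : (cF ds : Int) + cB ds ≤ mB ds := le_trans (le_max_right _ _) (le_max_left _ _)
  have h3 : (cF ds : Int) + PySem.Int.floordiv ((cA ds : Int) + cB ds + cX ds + 1) 2 ≤ mB ds :=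
    le_max_right _ _
  unfold closed
  omega

theorem mB_le_val (ds : List (Char × Char)) (hd : ∀ p ∈ ds, p.1 ≠ p.2)
    (cs : List Char) (hcs : cs ∈ tupC ds.length) : mB ds ≤ valOf ds cs := by
  have hcl : closed ds (valOf ds cs) (valOf ds cs) :=
    (feas_iff_closed ds hd _ _).mp
      ⟨cs, hcs, le_max_left _ _, le_max_right _ _⟩
  obtain ⟨hc1, hc2, hc3⟩ := hcl
  have hq := floordiv2_bounds ((cA ds : Int) + cB ds + cX ds + 1)
  unfold mB
  apply max_le (max_le (by omega) (by omega))
  omega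

theorem feasible_iff_closed (ds : List (Char × Char)) (v1 v2 : Int) :
    feasible (cF ds) (cA ds) (cB ds) (cX ds) v1 v2 = true ↔ closed ds v1 v2 := by
  simp only [feasible, closed, Bool.and_eq_true, decide_eq_true_eq, ge_iff_le]
  constructor
  · rintro ⟨⟨h1, h2⟩, h3⟩; exact ⟨by omega, by omega, by omega⟩
  · rintro ⟨h1, h2, h3⟩; exact ⟨⟨by omega, by omega⟩, by omega⟩

theorem greedy_finds (ds : List (Char × Char)) (hd : ∀ p ∈ ds, p.1 ≠ p.2) (u1 u2 : Int)
    (hf : closed ds u1 u2) :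
    (tupC ds.length).find?
      (fun cs => decide ((c1 ds cs : Int) ≤ u1) && decide ((c2 ds cs : Int) ≤ u2))
    = some (greedyR ds u1 u2) := by
  induction ds generalizing u1 u2 with
  | nil =>
    obtain ⟨h1, h2, _⟩ := hf
    simp only [List.length_nil, tupC, greedyR, List.find?_singleton]
    rw [if_pos]
    simp only [c1, c2, List.zip_nil_right, List.countP_nil, Nat.cast_zero]
    simp only [cF, cA, cB, cX, List.countP_nil, Nat.cast_zero] at h1 h2
    simp; omega
  | cons p ds ih =>
    have hp := hd p List.mem_cons_self
    have hd' : ∀ q ∈ ds, q.1 ≠ q.2 := fun q hq => hd q (List.mem_cons_of_mem _ hq)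
    have hsplit := (closed_cons_iff p ds hp u1 u2).mp hf
    rw [show (p :: ds).length = ds.length + 1 from rfl]
    simp only [tupC, List.find?_append, List.find?_map]
    have hc0 : ∀ t : List Char,
        ((fun cs => decide ((c1 (p :: ds) cs : Int) ≤ u1) && decide ((c2 (p :: ds) cs : Int) ≤ u2))
          ∘ (fun t => '0' :: t)) t
        = (fun t => decide ((c1 ds t : Int) ≤ u1 - (if p.1 ≠ '0' then 1 else 0)) &&
            decide ((c2 ds t : Int) ≤ u2 - (if p.2 ≠ '0' then 1 else 0))) t := by
      intro t
      simp only [Function.comp]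
      apply decand
      rw [c1_cons, c2_cons]
      push_cast
      by_cases h1 : p.1 = '0' <;> by_cases h2 : p.2 = '0' <;> simp [h1, h2] <;> omega
    have hc1 : ∀ t : List Char,
        ((fun cs => decide ((c1 (p :: ds) cs : Int) ≤ u1) && decide ((c2 (p :: ds) cs : Int) ≤ u2))
          ∘ (fun t => '1' :: t)) t
        = (fun t => decide ((c1 ds t : Int) ≤ u1 - (if p.1 ≠ '1' then 1 else 0)) &&
            decide ((c2 ds t : Int) ≤ u2 - (if p.2 ≠ '1' then 1 else 0))) t := by
      intro t
      simp only [Function.comp]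
      apply decand
      rw [c1_cons, c2_cons]
      push_cast
      by_cases h1 : p.1 = '1' <;> by_cases h2 : p.2 = '1' <;> simp [h1, h2] <;> omega
    rw [find?_congr _ _ _ hc0, find?_congr _ _ _ hc1]
    by_cases h0 : closed ds (u1 - (if p.1 ≠ '0' then 1 else 0)) (u2 - (if p.2 ≠ '0' then 1 else 0))
    · rw [ih hd' _ _ h0]
      show some ('0' :: greedyR ds _ _) = some (greedyR (p :: ds) u1 u2)
      simp only [greedyR]
      rw [if_pos ((feasible_iff_closed ds _ _).mpr h0)]
    · have h1c : closed ds (u1 - (if p.1 ≠ '1' then 1 else 0)) (u2 - (if p.2 ≠ '1' then 1 else 0)) := by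
        rcases hsplit with h | h
        · exact absurd h h0
        · exact h
      have hnone : (tupC ds.length).find?
          (fun t => decide ((c1 ds t : Int) ≤ u1 - (if p.1 ≠ '0' then 1 else 0)) &&
            decide ((c2 ds t : Int) ≤ u2 - (if p.2 ≠ '0' then 1 else 0))) = none := by
        rw [List.find?_eq_none]
        intro t ht hmem
        simp only [Bool.and_eq_true, decide_eq_true_eq] at hmem
        exact h0 ((feas_iff_closed ds hd' _ _).mp ⟨t, ht, hmem.1, hmem.2⟩)
      rw [hnone]
      simp only [Option.map_none, Option.none_or]
      rw [ih hd' _ _ h1c]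
      show some ('1' :: greedyR ds _ _) = some (greedyR (p :: ds) u1 u2)
      simp only [greedyR]
      have hff : ¬ (feasible (cF ds) (cA ds) (cB ds) (cX ds)
          (u1 - (if p.1 ≠ '0' then 1 else 0)) (u2 - (if p.2 ≠ '0' then 1 else 0)) = true) :=
        fun hh => h0 ((feasible_iff_closed ds _ _).mp hh)
      rw [if_neg hff]

-- ---- B's suffix bounds ----

theorem sufT_eq (ds : List (Char × Char)) (hd : ∀ p ∈ ds, p.1 ≠ p.2) :
    sufT ds = ((cF ds + cB ds : Int), (cF ds + cA ds : Int),
               (2 * cF ds + cA ds + cB ds + cX ds : Int)) := by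
  induction ds with
  | nil => simp [sufT, cF, cA, cB, cX]
  | cons p tl ih =>
    have hp := hd p List.mem_cons_self
    have hd' : ∀ q ∈ tl, q.1 ≠ q.2 := fun q hq => hd q (List.mem_cons_of_mem _ hq)
    obtain ⟨px, py⟩ := p
    simp only at hp
    simp only [sufT, ih hd', cost, cF, cA, cB, cX, List.countP_cons]
    rcases hb1 : isbit px <;> rcases hb2 : isbit py
    · obtain ⟨h10, h11⟩ := isbit_false px hb1
      obtain ⟨h20, h21⟩ := isbit_false py hb2
      simp only [typeF, typeA, typeB, typeX, hb1, hb2]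
      simp [h10, h11, h20, h21, Prod.ext_iff]
      push_cast
      omega
    · obtain ⟨h10, h11⟩ := isbit_false px hb1
      rcases (isbit_iff py).mp hb2 with rfl | rfl <;>
        · simp only [typeF, typeA, typeB, typeX, hb1, hb2]
          simp [h10, h11, Prod.ext_iff]
          push_cast
          omega
    · obtain ⟨h20, h21⟩ := isbit_false py hb2
      rcases (isbit_iff px).mp hb1 with rfl | rfl <;>
        · simp only [typeF, typeA, typeB, typeX, hb1, hb2]
          simp [h20, h21, Prod.ext_iff]
          push_cast
          omega
    · rcases (isbit_iff px).mp hb1 with rfl | rfl <;>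
        rcases (isbit_iff py).mp hb2 with rfl | rfl
      · simp at hp
      · simp only [typeF, typeA, typeB, typeX, hb1, hb2]
        simp [Prod.ext_iff]
        push_cast
        omega
      · simp only [typeF, typeA, typeB, typeX, hb1, hb2]
        simp [Prod.ext_iff]
        push_cast
        omega
      · simp at hp

theorem sufSuffixes_head (tl : List (Char × Char)) :
    sufSuffixes tl = sufT tl :: (sufSuffixes tl).drop 1 := by
  cases tl <;> rfl

theorem suf_build (ds : List (Char × Char)) :
    (ds.reverse.foldl sufStep [(0, 0, 0)]).reverse = sufSuffixes ds := by
  induction ds with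
  | nil => rfl
  | cons p tl ih =>
    rw [List.reverse_cons, List.foldl_append]
    simp only [List.foldl_cons, List.foldl_nil]
    have hL : tl.reverse.foldl sufStep [(0, 0, 0)] = (sufSuffixes tl).reverse := by
      rw [← ih, List.reverse_reverse]
    rw [hL]
    unfold sufStep
    have hrev : (sufSuffixes tl).reverse
        = ((sufSuffixes tl).drop 1).reverse ++ [sufT tl] := by
      conv_lhs => rw [sufSuffixes_head tl]
      simp
    rw [hrev, PySem.List.pyGetD_neg_one_append_singleton]
    rw [show (sufSuffixes (p :: tl)) = sufT (p :: tl) :: sufSuffixes tl from rfl]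
    conv_rhs => rw [sufSuffixes_head tl]
    simp [sufT]

theorem m_eq_mB (ds : List (Char × Char)) (hd : ∀ p ∈ ds, p.1 ≠ p.2) :
    max (max (sufT ds).1 (sufT ds).2.1) (PySem.Int.floordiv ((sufT ds).2.2 + 1) 2) = mB ds := by
  rw [sufT_eq ds hd]
  have h1 := floordiv2_bounds ((cA ds : Int) + cB ds + cX ds + 1)
  have h2 := floordiv2_bounds (2 * (cF ds : Int) + cA ds + cB ds + cX ds + 1)
  have hq : PySem.Int.floordiv (2 * (cF ds : Int) + cA ds + cB ds + cX ds + 1) 2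
      = (cF ds : Int) + PySem.Int.floordiv ((cA ds : Int) + cB ds + cX ds + 1) 2 := by omega
  simp only [hq, mB]
  rw [max_comm ((cF ds : Int) + cB ds) ((cF ds : Int) + cA ds)]

theorem pick_loop (ds : List (Char × Char)) (hd : ∀ p ∈ ds, p.1 ≠ p.2)
    (u1 u2 : Int) (acc : List Char) :
    ((ds.zip ((sufSuffixes ds).drop 1)).foldl pickStep (u1, u2, acc)).2.2
    = acc ++ greedyR ds u1 u2 := by
  induction ds generalizing u1 u2 acc with
  | nil => simp [greedyR]
  | cons p tl ih =>
    have hd' : ∀ q ∈ tl, q.1 ≠ q.2 := fun q hq => hd q (List.mem_cons_of_mem _ hq)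
    rw [show (sufSuffixes (p :: tl)).drop 1 = sufSuffixes tl from rfl]
    conv_lhs => rw [sufSuffixes_head tl]
    rw [List.zip_cons_cons, List.foldl_cons]
    have hsT := sufT_eq tl hd'
    simp only [pickStep, cost, hsT]
    by_cases hfe : feasible (cF tl) (cA tl) (cB tl) (cX tl)
        (u1 - (if p.1 ≠ '0' then 1 else 0)) (u2 - (if p.2 ≠ '0' then 1 else 0)) = true
    · have hiff : u1 - (if p.1 ≠ '0' then (1:Int) else 0) ≥ (cF tl + cB tl : Int)
          ∧ u2 - (if p.2 ≠ '0' then (1:Int) else 0) ≥ (cF tl + cA tl : Int)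
          ∧ u1 - (if p.1 ≠ '0' then (1:Int) else 0) + (u2 - (if p.2 ≠ '0' then (1:Int) else 0))
            ≥ (2 * cF tl + cA tl + cB tl + cX tl : Int) := by
        simp only [feasible, Bool.and_eq_true, decide_eq_true_eq, ge_iff_le] at hfe
        refine ⟨by push_cast; omega, by push_cast; omega, by push_cast; omega⟩
      rw [if_pos hiff, ih hd']
      simp only [greedyR]
      rw [if_pos hfe]
      simp
    · have hiff : ¬ (u1 - (if p.1 ≠ '0' then (1:Int) else 0) ≥ (cF tl + cB tl : Int)
          ∧ u2 - (if p.2 ≠ '0' then (1:Int) else 0) ≥ (cF tl + cA tl : Int)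
          ∧ u1 - (if p.1 ≠ '0' then (1:Int) else 0) + (u2 - (if p.2 ≠ '0' then (1:Int) else 0))
            ≥ (2 * cF tl + cA tl + cB tl + cX tl : Int)) := by
        simp only [feasible, Bool.and_eq_true, decide_eq_true_eq, ge_iff_le] at hfe ⊢
        intro hc
        exact hfe ⟨⟨by push_cast at hc ⊢; omega, by push_cast at hc ⊢; omega⟩,
          by push_cast at hc ⊢; omega⟩
      rw [if_neg hiff, ih hd']
      simp only [greedyR]
      rw [if_neg hfe]
      simp

theorem greedyR_length (ds : List (Char × Char)) (u1 u2 : Int) :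
    (greedyR ds u1 u2).length = ds.length := by
  induction ds generalizing u1 u2 with
  | nil => rfl
  | cons p ds ih =>
    simp only [greedyR]
    split <;> split <;> split <;> simp [ih]

theorem filter_eq_diffsOf (P : List (Char × Char)) :
    P.filter (fun p => p.1 ≠ p.2) = diffsOf P := rfl

-- ---- rebuild loop ----

theorem rebuild_loop_eq (al bl : List Char) (cs : List Char) (acc : List Char)
    (h : al.length ≤ bl.length) (hcs : cs.length = (diffsOf (al.zip bl)).length) :
    ((al.zip bl).foldl
      (fun oc p =>
        if p.1 ≠ p.2 then
          match oc.2 with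
          | c :: it' => (oc.1 ++ [c], it')
          | [] => (oc.1, ([] : List Char))
        else (oc.1 ++ [p.1], oc.2))
      (acc, cs)).1
    = acc ++ patchP (al.zip bl) cs := by
  induction al generalizing bl cs acc with
  | nil => simp [patchP]
  | cons x xs ih =>
    cases bl with
    | nil => simp at h
    | cons y ys =>
      have h' : xs.length ≤ ys.length := by simpa using h
      rw [List.zip_cons_cons] at *
      rw [diffsOf_cons] at hcs
      simp only [List.foldl_cons]
      by_cases hxy : x = y
      · rw [if_neg (by simp [hxy])]
        rw [if_neg (by simp [hxy])] at hcs
        have hpp : patchP ((x, y) :: xs.zip ys) cs = x :: patchP (xs.zip ys) cs := by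
          simp [patchP, hxy]
        rw [hpp, ih ys cs (acc ++ [x]) h' hcs]
        simp
      · rw [if_pos (by simp [hxy])]
        rw [if_pos (by simp [hxy])] at hcs
        have hlen : 0 < cs.length := by rw [hcs]; simp
        cases cs with
        | nil => simp at hlen
        | cons c cs' =>
          have hcs' : cs'.length = (diffsOf (xs.zip ys)).length := by simpa using hcs
          have hpp : patchP ((x, y) :: xs.zip ys) (c :: cs') = c :: patchP (xs.zip ys) cs' := by
            simp [patchP, hxy]
          rw [hpp]
          show ((xs.zip ys).foldl _ (acc ++ [c], cs')).1 = _
          rw [ih ys cs' (acc ++ [c]) h' hcs']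
          simp

-- ---- the two sides reduced to a common canonical form ----

theorem B_eq (a b : String) (n : Int) (h : a.toList.length ≤ b.toList.length) :
    search_result_alt a b n
    = if mB (diffsOf (a.toList.zip b.toList)) ≥ n then a
      else String.ofList (patchP (a.toList.zip b.toList)
        (greedyR (diffsOf (a.toList.zip b.toList))
          (mB (diffsOf (a.toList.zip b.toList))) (mB (diffsOf (a.toList.zip b.toList))))) := by
  have hd : ∀ p ∈ diffsOf (a.toList.zip b.toList), p.1 ≠ p.2 := by
    intro p hp
    have := List.of_mem_filter hp
    simpa using this
  unfold search_result_alt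
  dsimp only
  rw [filter_eq_diffsOf, suf_build]
  conv_lhs => rw [sufSuffixes_head (diffsOf (a.toList.zip b.toList))]
  rw [PySem.List.pyGetD_zero_cons]
  rw [m_eq_mB _ hd]
  by_cases hmn : mB (diffsOf (a.toList.zip b.toList)) ≥ n
  · rw [if_pos hmn, if_pos hmn]
  · rw [if_neg hmn, if_neg hmn]
    rw [PySem.List.slice_from_one]
    rw [show (sufT (diffsOf (a.toList.zip b.toList)) ::
        (sufSuffixes (diffsOf (a.toList.zip b.toList))).drop 1).tail
        = (sufSuffixes (diffsOf (a.toList.zip b.toList))).drop 1 from rfl]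
    rw [pick_loop _ hd _ _ []]
    rw [List.nil_append]
    rw [rebuild_loop_eq a.toList b.toList _ [] h (by rw [greedyR_length])]
    rw [List.nil_append]

theorem A_eq (a b : String) (n : Int) (h : a.toList.length ≤ b.toList.length) :
    search_result a b n
    = if mB (diffsOf (a.toList.zip b.toList)) ≥ n then a
      else String.ofList (patchP (a.toList.zip b.toList)
        (greedyR (diffsOf (a.toList.zip b.toList))
          (mB (diffsOf (a.toList.zip b.toList))) (mB (diffsOf (a.toList.zip b.toList))))) := by
  have hd : ∀ p ∈ diffsOf (a.toList.zip b.toList), p.1 ≠ p.2 := by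
    intro p hp
    have := List.of_mem_filter hp
    simpa using this
  unfold search_result
  dsimp only
  rw [ghi_eq a.toList b.toList h]
  dsimp only [Int.toNat_natCast]
  have hfold : List.foldl
      (fun (st : Int × List Char) var =>
        if max (hamming a.toList (List.foldl
          (fun t i =>
            PySem.List.pySetD t (PySem.List.pyGetD (dIdxAbs (a.toList.zip b.toList) 0) i 0)
              (pyDigit (PySem.List.pyGetD var i 0)))
          a.toList (PySem.List.pyRange 0 ((dIdxAbs (a.toList.zip b.toList) 0).length : Int) 1))) (hamming b.toList (List.foldl
          (fun t i =>
            PySem.List.pySetD t (PySem.List.pyGetD (dIdxAbs (a.toList.zip b.toList) 0) i 0)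
              (pyDigit (PySem.List.pyGetD var i 0)))
          a.toList (PySem.List.pyRange 0 ((dIdxAbs (a.toList.zip b.toList) 0).length : Int) 1))) < st.1 then
          (max (hamming a.toList (List.foldl
          (fun t i =>
            PySem.List.pySetD t (PySem.List.pyGetD (dIdxAbs (a.toList.zip b.toList) 0) i 0)
              (pyDigit (PySem.List.pyGetD var i 0)))
          a.toList (PySem.List.pyRange 0 ((dIdxAbs (a.toList.zip b.toList) 0).length : Int) 1))) (hamming b.toList (List.foldl
          (fun t i =>
            PySem.List.pySetD t (PySem.List.pyGetD (dIdxAbs (a.toList.zip b.toList) 0) i 0)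
              (pyDigit (PySem.List.pyGetD var i 0)))
          a.toList (PySem.List.pyRange 0 ((dIdxAbs (a.toList.zip b.toList) 0).length : Int) 1))), (List.foldl
          (fun t i =>
            PySem.List.pySetD t (PySem.List.pyGetD (dIdxAbs (a.toList.zip b.toList) 0) i 0)
              (pyDigit (PySem.List.pyGetD var i 0)))
          a.toList (PySem.List.pyRange 0 ((dIdxAbs (a.toList.zip b.toList) 0).length : Int) 1)))
        else st)
      (n, a.toList) (product01 (diffsOf (a.toList.zip b.toList)).length)
      = List.foldl
        (fun (st : Int × List Char) cs =>
          if valOf (diffsOf (a.toList.zip b.toList)) cs < st.1 then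
            (valOf (diffsOf (a.toList.zip b.toList)) cs, patchP (a.toList.zip b.toList) cs)
          else st)
        (n, a.toList) (tupC (diffsOf (a.toList.zip b.toList)).length) := by
    rw [tupC_eq_map, List.foldl_map]
    apply PySem.List.foldl_congr_mem
    intro st var hvar
    have hdig : var.map pyDigit ∈ tupC (diffsOf (a.toList.zip b.toList)).length := by
      rw [tupC_eq_map]
      exact List.mem_map_of_mem hvar
    have hdlen : (var.map pyDigit).length = (diffsOf (a.toList.zip b.toList)).length :=
      ((mem_tupC _ _).mp hdig).1
    have hvlen : var.length = (diffsOf (a.toList.zip b.toList)).length := by simpa using hdlen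
    have hile : (dIdxAbs (a.toList.zip b.toList) 0).length ≤ var.length := by
      rw [dIdxAbs_length, hvlen]
    have hpatch : (List.foldl
          (fun t i =>
            PySem.List.pySetD t (PySem.List.pyGetD (dIdxAbs (a.toList.zip b.toList) 0) i 0)
              (pyDigit (PySem.List.pyGetD var i 0)))
          a.toList (PySem.List.pyRange 0 ((dIdxAbs (a.toList.zip b.toList) 0).length : Int) 1)) = patchP (a.toList.zip b.toList) (var.map pyDigit) := by
      rw [foldl_pyRange_zip (dIdxAbs (a.toList.zip b.toList) 0) var 0 0
        (fun t i x y => PySem.List.pySetD t x (pyDigit y)) a.toList hile]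
      rw [foldl_enumerate_snd ((dIdxAbs (a.toList.zip b.toList) 0).zip var) 0
        (fun t q => PySem.List.pySetD t q.1 (pyDigit q.2)) a.toList]
      rw [← patch_fold_eq a.toList b.toList (var.map pyDigit) h hdlen]
      rw [List.zip_map_right, List.foldl_map]
      rfl
    rw [hpatch]
    rw [hamming_patch_left a.toList b.toList _ h hdlen,
      hamming_patch_right a.toList b.toList _ h hdlen]
    rfl
  rw [hfold]
  rw [foldmin (valOf (diffsOf (a.toList.zip b.toList))) (patchP (a.toList.zip b.toList))
    (tupC (diffsOf (a.toList.zip b.toList)).length) n a.toList]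
  by_cases hmn : mB (diffsOf (a.toList.zip b.toList)) ≥ n
  · rw [if_pos hmn]
    have hnone : (tupC (diffsOf (a.toList.zip b.toList)).length).find?
        (fun v => decide (valOf (diffsOf (a.toList.zip b.toList)) v
            ≤ minf (valOf (diffsOf (a.toList.zip b.toList)))
                (tupC (diffsOf (a.toList.zip b.toList)).length) n)
          && decide (valOf (diffsOf (a.toList.zip b.toList)) v < n)) = none := by
      rw [List.find?_eq_none]
      intro cs hcsm
      have := mB_le_val (diffsOf (a.toList.zip b.toList)) hd cs hcsm
      simp only [Bool.and_eq_true, decide_eq_true_eq]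
      rintro ⟨_, hlt⟩
      omega
    rw [hnone]
    exact String.ofList_toList
  · rw [if_neg hmn]
    push_neg at hmn
    have hclosed := closed_mB (diffsOf (a.toList.zip b.toList)) hd
    have hminf : minf (valOf (diffsOf (a.toList.zip b.toList)))
        (tupC (diffsOf (a.toList.zip b.toList)).length) n
        = mB (diffsOf (a.toList.zip b.toList)) := by
      obtain ⟨cs0, hmem0, hc10, hc20⟩ :=
        (feas_iff_closed (diffsOf (a.toList.zip b.toList)) hd _ _).mpr hclosed
      have hub := le_trans (minf_le_of_mem (valOf (diffsOf (a.toList.zip b.toList)))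
        (tupC (diffsOf (a.toList.zip b.toList)).length) n hmem0) (max_le hc10 hc20)
      have hlb := le_minf (valOf (diffsOf (a.toList.zip b.toList)))
        (tupC (diffsOf (a.toList.zip b.toList)).length) n (mB (diffsOf (a.toList.zip b.toList)))
        (by omega) (fun cs hcs => mB_le_val (diffsOf (a.toList.zip b.toList)) hd cs hcs)
      omega
    rw [hminf]
    have hpe : ∀ cs, (decide (valOf (diffsOf (a.toList.zip b.toList)) cs
          ≤ mB (diffsOf (a.toList.zip b.toList)))
        && decide (valOf (diffsOf (a.toList.zip b.toList)) cs < n))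
        = (decide ((c1 (diffsOf (a.toList.zip b.toList)) cs : Int)
            ≤ mB (diffsOf (a.toList.zip b.toList)))
          && decide ((c2 (diffsOf (a.toList.zip b.toList)) cs : Int)
            ≤ mB (diffsOf (a.toList.zip b.toList)))) := by
      intro cs
      apply decand
      unfold valOf
      constructor
      · rintro ⟨h1, _⟩
        exact ⟨le_trans (le_max_left _ _) h1, le_trans (le_max_right _ _) h1⟩
      · rintro ⟨h1, h2⟩
        exact ⟨max_le h1 h2, by have := max_le h1 h2; omega⟩
    rw [find?_congr _ _ _ hpe,
      greedy_finds (diffsOf (a.toList.zip b.toList)) hd _ _ hclosed]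

-- ===== VERDICT (by name: the statement is the Claim_ definition above) =====

theorem search_result_spec : Claim_equal_search_result := by
  intro a b n _ hpre
  unfold Spec_search_result
  rw [A_eq a b n hpre, B_eq a b n hpre]
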